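-- pv_equiv track=rewrite | github.com/abrhinehart/CountyData2 | tests/test_journal_discipline.py | _subsection_blocks
-- ===== SOURCE A (Python) =====
-- REQUIRED_SUBSECTIONS = ("### Open", "### Risks", "### Done")
--
-- def _subsection_blocks(module_text: str) -> dict[str, tuple[int, int]]:
--     """Return {subsection_header: (start_line_idx, end_line_idx)} within module_text."""
--     lines = module_text.splitlines()
--     positions: list[tuple[int, str]] = []
--     for i, line in enumerate(lines):
--         stripped = line.strip()
--         if stripped in REQUIRED_SUBSECTIONS:
--             positions.append((i, stripped))
--     ranges: dict[str, tuple[int, int]] = {}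
--     for i, (start, header) in enumerate(positions):
--         end = positions[i + 1][0] if i + 1 < len(positions) else len(lines)
--         ranges[header] = (start, end)
--     return ranges
-- ===== SOURCE B (Python) =====
-- REQUIRED_SUBSECTIONS = ("### Open", "### Risks", "### Done")
--
-- def _subsection_blocks(module_text: str) -> dict[str, tuple[int, int]]:
--     """Single pass: carry the pending header and close its range at the next header."""
--     lines = module_text.splitlines()
--     ranges: dict[str, tuple[int, int]] = {}
--     pending_header = None
--     pending_start = 0
--     for i, line in enumerate(lines):
--         stripped = line.strip()
--         if stripped in REQUIRED_SUBSECTIONS: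
--             if pending_header is not None:
--                 ranges[pending_header] = (pending_start, i)
--             pending_header = stripped
--             pending_start = i
--     if pending_header is not None:
--         ranges[pending_header] = (pending_start, len(lines))
--     return ranges
-- ===== Notes on version B (the rewrite author's own statement) =====
-- stated objective: simpler
-- what changed: Replaces the two-pass version (collect all header positions, then index positions[i+1] to find each range end) by a single stateful pass that carries the pending header and closes its range when the next header (or end of file) is reached; the intermediate positions list disappears.
import Mathlib
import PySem

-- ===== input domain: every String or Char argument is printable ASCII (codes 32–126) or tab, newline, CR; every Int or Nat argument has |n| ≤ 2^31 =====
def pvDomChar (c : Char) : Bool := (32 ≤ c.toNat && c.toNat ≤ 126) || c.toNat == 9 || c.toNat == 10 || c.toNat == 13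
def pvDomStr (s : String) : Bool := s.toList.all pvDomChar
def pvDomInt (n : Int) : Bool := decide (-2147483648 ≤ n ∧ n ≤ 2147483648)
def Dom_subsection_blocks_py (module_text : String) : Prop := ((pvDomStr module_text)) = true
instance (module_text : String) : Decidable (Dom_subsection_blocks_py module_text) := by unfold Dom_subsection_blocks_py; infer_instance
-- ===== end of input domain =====

-- B replaces A's two passes (collect header positions, then look up positions[i+1] for each
-- range end) by one stateful pass carrying the pending header; objective: simpler.

-- ===== PORT A =====
-- membership test 'stripped in REQUIRED_SUBSECTIONS' (shared by both ports)
def pvCond (s : String) : Bool := s == "### Open" || s == "### Risks" || s == "### Done"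

def subsection_blocks_py (module_text : String) : List (String × Int × Int) :=
  let lines := PySem.Str.splitlines module_text
  let positions : List (Int × String) :=
    (PySem.List.enumerate lines 0).foldl
      (fun acc p =>
        let stripped := PySem.Str.strip p.2
        if pvCond stripped then acc ++ [(p.1, stripped)] else acc) []
  let ranges : PySem.Dict String (Int × Int) :=
    (PySem.List.enumerate positions 0).foldl
      (fun d q =>
        -- positions[i + 1][0] is guarded in range, so pyGetD is exact here
        let endv : Int :=
          if q.1 + 1 < (positions.length : Int) then
            (PySem.List.pyGetD positions (q.1 + 1) (0, "")).1
          else (lines.length : Int)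
        d.insert q.2.2 (q.2.1, endv)) PySem.Dict.empty
  ranges.items

-- ===== PORT B =====
def subsection_blocks_py_alt (module_text : String) : List (String × Int × Int) :=
  let lines := PySem.Str.splitlines module_text
  let final :=
    (PySem.List.enumerate lines 0).foldl
      (fun (st : PySem.Dict String (Int × Int) × Option (String × Int)) p =>
        let stripped := PySem.Str.strip p.2
        if pvCond stripped then
          match st.2 with
          | some ph => (st.1.insert ph.1 (ph.2, p.1), some (stripped, p.1))
          | none => (st.1, some (stripped, p.1))
        else st)
      (PySem.Dict.empty, none)
  (match final.2 with
   | some ph => final.1.insert ph.1 (ph.2, (lines.length : Int))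
   | none => final.1).items

-- ===== PRECONDITION & SPEC =====
def Spec_subsection_blocks_py (module_text : String) (out : List (String × Int × Int)) : Prop := out = subsection_blocks_py_alt module_text
instance (module_text : String) (out : List (String × Int × Int)) : Decidable (Spec_subsection_blocks_py module_text out) := by unfold Spec_subsection_blocks_py; infer_instance

-- ===== CLAIM (what is proved, stated in full; the proofs are below) =====
def Claim_equal_subsection_blocks_py : Prop := ∀ (module_text : String), Dom_subsection_blocks_py module_text → Spec_subsection_blocks_py module_text (subsection_blocks_py module_text)

-- ===== LEMMAS AND PROOFS =====

-- the per-line filter both ports apply: a match contributes (index, stripped line)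
def pvF (p : Int × String) : Option (Int × String) :=
  let s := PySem.Str.strip p.2
  if pvCond s then some (p.1, s) else none

-- target list: each header with (start, next start or L)
def pvT (ps : List (Int × String)) (L : Int) : List (String × Int × Int) :=
  (ps.zip (ps.tail.map Prod.fst ++ [L])).map (fun q => (q.1.2, q.1.1, q.2))

def pvIns (d : PySem.Dict String (Int × Int)) (x : String × Int × Int) : PySem.Dict String (Int × Int) :=
  d.insert x.1 x.2

-- B's loop step on a matching line (i, h)
def pvGB (st : PySem.Dict String (Int × Int) × Option (String × Int)) (b : Int × String) :
    PySem.Dict String (Int × Int) × Option (String × Int) :=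
  match st.2 with
  | some ph => (st.1.insert ph.1 (ph.2, b.1), some (b.2, b.1))
  | none => (st.1, some (b.2, b.1))

-- B's epilogue
def pvFin (L : Int) (st : PySem.Dict String (Int × Int) × Option (String × Int)) :
    PySem.Dict String (Int × Int) :=
  match st.2 with
  | some ph => st.1.insert ph.1 (ph.2, L)
  | none => st.1

theorem pv_foldl_collect {α β : Type} (f : α → Option β) :
    ∀ (l : List α) (acc : List β),
      l.foldl (fun acc a => (f a).elim acc (fun b => acc ++ [b])) acc
        = acc ++ l.filterMap f := by
  intro l
  induction l with
  | nil => intro acc; simp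
  | cons a l ih =>
      intro acc
      simp only [List.foldl_cons, List.filterMap_cons]
      cases h : f a with
      | none => simp [ih]
      | some b => simp [ih]

theorem pv_foldl_filterMap {α β σ : Type} (f : α → Option β) (g : σ → β → σ) :
    ∀ (l : List α) (st : σ),
      l.foldl (fun st a => (f a).elim st (g st)) st
        = (l.filterMap f).foldl g st := by
  intro l
  induction l with
  | nil => intro st; simp
  | cons a l ih =>
      intro st
      simp only [List.foldl_cons, List.filterMap_cons]
      cases h : f a with
      | none => simp [ih]
      | some b => simp [ih]

theorem pv_A2 (ps : List (Int × String)) (L : Int) :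
    (PySem.List.enumerate ps 0).foldl
      (fun d q =>
        let endv : Int :=
          if q.1 + 1 < (ps.length : Int) then
            (PySem.List.pyGetD ps (q.1 + 1) (0, "")).1
          else L
        d.insert q.2.2 (q.2.1, endv)) PySem.Dict.empty
      = (pvT ps L).foldl pvIns PySem.Dict.empty := by
  have hmap : (PySem.List.enumerate ps 0).map
      (fun q : Int × (Int × String) =>
        ((q.2.2, q.2.1,
          if q.1 + 1 < (ps.length : Int) then
            (PySem.List.pyGetD ps (q.1 + 1) (0, "")).1
          else L) : String × Int × Int)) = pvT ps L := by
    refine List.ext_getElem ?_ ?_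
    · cases ps with
      | nil => simp [pvT]
      | cons a t => simp [pvT, PySem.List.length_enumerate]
    · intro k hk hk'
      cases ps with
      | nil => simp at hk
      | cons a t =>
          simp only [List.getElem_map, PySem.List.getElem_enumerate, pvT, List.getElem_zip]
          have hkps : k < t.length + 1 := by simpa [PySem.List.length_enumerate] using hk
          by_cases hlt : k < t.length
          · have h1 : ((0 : Int) + k) + 1 < (((a :: t).length : Nat) : Int) := by
              push_cast [List.length_cons]; omega
            have h2 : ((0 : Int) + k) + 1 = ((k + 1 : Nat) : Int) := by push_cast; ring
            rw [if_pos h1, h2, PySem.List.pyGetD_natCast]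
            have htl : k < ((a :: t).tail.map Prod.fst).length := by simpa using hlt
            have hlt' : k + 1 < (a :: t).length := by simp; omega
            rw [List.getElem_append_left htl]
            simp [List.getD_eq_getElem?_getD, List.getElem?_eq_getElem hlt']
          · have h1 : ¬ (((0 : Int) + k) + 1 < (((a :: t).length : Nat) : Int)) := by
              push_cast [List.length_cons]; omega
            rw [if_neg h1]
            have htl : ((a :: t).tail.map Prod.fst).length ≤ k := by simp; omega
            rw [List.getElem_append_right htl]
            have hk0 : k = t.length := by omega
            simp [hk0]
  rw [← hmap, List.foldl_map]
  rfl

theorem pv_B_acc (L : Int) :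
    ∀ (ps : List (Int × String)) (d : PySem.Dict String (Int × Int)) (h : String) (i : Int),
      pvFin L (ps.foldl pvGB (d, some (h, i))) = (pvT ((i, h) :: ps) L).foldl pvIns d := by
  intro ps
  induction ps with
  | nil => intro d h i; simp [pvFin, pvT, pvIns]
  | cons q rest ih =>
      intro d h i
      obtain ⟨i', h'⟩ := q
      simp only [List.foldl_cons]
      have hstep : pvGB (d, some (h, i)) (i', h') = (d.insert h (i, i'), some (h', i')) := rfl
      rw [hstep, ih]
      have : pvT ((i, h) :: (i', h') :: rest) L
          = (h, i, i') :: pvT ((i', h') :: rest) L := by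
        simp [pvT]
      rw [this, List.foldl_cons]
      rfl

theorem pv_B2 (ps : List (Int × String)) (L : Int) :
    pvFin L (ps.foldl pvGB (PySem.Dict.empty, none)) = (pvT ps L).foldl pvIns PySem.Dict.empty := by
  cases ps with
  | nil => simp [pvFin, pvT]
  | cons q rest =>
      obtain ⟨i, h⟩ := q
      simp only [List.foldl_cons]
      have hstep : pvGB (PySem.Dict.empty, none) (i, h)
          = ((PySem.Dict.empty : PySem.Dict String (Int × Int)), some (h, i)) := rfl
      rw [hstep, pv_B_acc]

theorem pv_main (module_text : String) :
    subsection_blocks_py module_text = subsection_blocks_py_alt module_text := by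
  unfold subsection_blocks_py subsection_blocks_py_alt
  simp only []
  set lines := PySem.Str.splitlines module_text with hl
  -- rewrite A's first pass as a filterMap
  have hApass1 :
      (PySem.List.enumerate lines 0).foldl
        (fun acc p =>
          let stripped := PySem.Str.strip p.2
          if pvCond stripped then acc ++ [(p.1, stripped)] else acc) ([] : List (Int × String))
        = (PySem.List.enumerate lines 0).filterMap pvF := by
    have hfun : (fun (acc : List (Int × String)) (p : Int × String) =>
          let stripped := PySem.Str.strip p.2
          if pvCond stripped then acc ++ [(p.1, stripped)] else acc)
        = (fun acc p => (pvF p).elim acc (fun b => acc ++ [b])) := by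
      funext acc p
      simp only [pvF]
      split_ifs <;> rfl
    rw [hfun]
    simpa using pv_foldl_collect pvF (PySem.List.enumerate lines 0) []
  -- rewrite B's pass as a fold of pvGB over the same filterMap
  have hBpass :
      (PySem.List.enumerate lines 0).foldl
        (fun (st : PySem.Dict String (Int × Int) × Option (String × Int)) p =>
          let stripped := PySem.Str.strip p.2
          if pvCond stripped then
            match st.2 with
            | some ph => (st.1.insert ph.1 (ph.2, p.1), some (stripped, p.1))
            | none => (st.1, some (stripped, p.1))
          else st)
        (PySem.Dict.empty, none)
        = ((PySem.List.enumerate lines 0).filterMap pvF).foldl pvGB (PySem.Dict.empty, none) := by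
    have hfun : (fun (st : PySem.Dict String (Int × Int) × Option (String × Int)) (p : Int × String) =>
          let stripped := PySem.Str.strip p.2
          if pvCond stripped then
            match st.2 with
            | some ph => (st.1.insert ph.1 (ph.2, p.1), some (stripped, p.1))
            | none => (st.1, some (stripped, p.1))
          else st)
        = (fun st p => (pvF p).elim st (pvGB st)) := by
      funext st p
      obtain ⟨d, pend⟩ := st
      simp only [pvF]
      split_ifs <;> cases pend <;> rfl
    rw [hfun]
    exact pv_foldl_filterMap pvF pvGB (PySem.List.enumerate lines 0) (PySem.Dict.empty, none)
  rw [hApass1, hBpass]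
  congr 1
  rw [pv_A2 _ ((lines.length : Int))]
  rw [← pv_B2 _ ((lines.length : Int))]
  rfl

-- ===== VERDICT (by name: the statement is the Claim_ definition above) =====
theorem subsection_blocks_py_spec : Claim_equal_subsection_blocks_py := by
  intro module_text _
  unfold Spec_subsection_blocks_py
  exact pv_main module_text
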